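-- pv_equiv track=rewrite | github.com/keokukzh/AIAPP-Finisher | agents/request_handlers/optimization_handler.py | _get_project_type
-- ===== SOURCE A (Python) =====
-- from typing import Any, Dict, List
--
-- def _get_project_type(project_context: Dict[str, Any]) -> str:
--     """Bestimmt den Projekttyp"""
--     frameworks = project_context.get("frameworks", [])
--     if not frameworks:
--         return "Unknown"
--
--     has_frontend = any(f.get("type") == "Frontend" for f in frameworks)
--     has_backend = any(f.get("type") == "Backend" for f in frameworks)
--
--     if has_frontend and has_backend:
--         return "Full-Stack"
--     elif has_frontend:
--         return "Frontend"
--     elif has_backend: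
--         return "Backend"
--     else:
--         return "Unknown"
-- ===== SOURCE B (Python) =====
-- from typing import Any, Dict
--
-- _NAMES = ["Unknown", "Frontend", "Backend", "Full-Stack"]
--
-- def _get_project_type(project_context: Dict[str, Any]) -> str:
--     """Bestimmt den Projekttyp"""
--     mask = 0
--     for f in project_context.get("frameworks", []):
--         t = f.get("type")
--         if t == "Frontend":
--             mask |= 1
--         elif t == "Backend":
--             mask |= 2
--         if mask == 3:
--             break
--     return _NAMES[mask]
-- ===== Notes on version B (the rewrite author's own statement) =====
-- stated objective: alternative
-- what changed: Replaces A's two any() scans and four-way branch chain by a single fold accumulating a 2-bit presence mask with early exit once both bits are set, then a table lookup names[mask]; the empty-list guard disappears (mask 0 indexes 'Unknown').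
import Mathlib
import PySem

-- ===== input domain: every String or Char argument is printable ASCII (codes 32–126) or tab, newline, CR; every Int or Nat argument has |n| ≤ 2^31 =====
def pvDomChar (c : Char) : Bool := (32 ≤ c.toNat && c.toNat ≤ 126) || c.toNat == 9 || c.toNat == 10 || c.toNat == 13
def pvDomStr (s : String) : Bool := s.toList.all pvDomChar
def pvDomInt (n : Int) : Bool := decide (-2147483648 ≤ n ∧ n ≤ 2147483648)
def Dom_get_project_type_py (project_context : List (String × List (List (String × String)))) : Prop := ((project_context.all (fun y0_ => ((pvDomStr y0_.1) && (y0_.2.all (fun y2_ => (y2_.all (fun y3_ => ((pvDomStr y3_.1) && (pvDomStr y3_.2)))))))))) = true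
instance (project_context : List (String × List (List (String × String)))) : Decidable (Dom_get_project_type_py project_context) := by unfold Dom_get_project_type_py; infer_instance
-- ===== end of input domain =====

-- B replaces A's two any() scans and branch chain by one fold accumulating a 2-bit
-- presence mask with early exit, then a table lookup; objective: alternative.

-- ===== PORT A =====
def get_project_type_py (project_context : List (String × List (List (String × String)))) : String :=
  let frameworks := PySem.Dict.getD (PySem.Dict.mk project_context) "frameworks" []
  if frameworks = [] then "Unknown"
  else
    let has_frontend := frameworks.any (fun f => (PySem.Dict.mk f).get? "type" == some "Frontend")
    let has_backend := frameworks.any (fun f => (PySem.Dict.mk f).get? "type" == some "Backend")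
    if has_frontend && has_backend then "Full-Stack"
    else if has_frontend then "Frontend"
    else if has_backend then "Backend"
    else "Unknown"

-- ===== PORT B =====
def pvGPTnames : List String := ["Unknown", "Frontend", "Backend", "Full-Stack"]

-- B's for-loop with `break`: structural recursion on the list, mask accumulator
def pvGPTloop : List (List (String × String)) → Nat → Nat
  | [], mask => mask
  | f :: rest, mask =>
    let t := (PySem.Dict.mk f).get? "type"
    let mask' := if t == some "Frontend" then mask ||| 1
                 else if t == some "Backend" then mask ||| 2
                 else mask
    if mask' == 3 then mask' else pvGPTloop rest mask'

def get_project_type_py_alt (project_context : List (String × List (List (String × String)))) : String :=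
  let mask := pvGPTloop (PySem.Dict.getD (PySem.Dict.mk project_context) "frameworks" []) 0
  -- _NAMES[mask]: exact — the loop keeps 0 ≤ mask ≤ 3 (proved below), so Python never raises
  (PySem.List.pyGet? pvGPTnames (mask : Int)).getD ""

-- ===== PRECONDITION & SPEC =====
def Spec_get_project_type_py (project_context : List (String × List (List (String × String)))) (out : String) : Prop := out = get_project_type_py_alt project_context
instance (project_context : List (String × List (List (String × String)))) (out : String) : Decidable (Spec_get_project_type_py project_context out) := by unfold Spec_get_project_type_py; infer_instance

-- ===== CLAIM (what is proved, stated in full; the proofs are below) =====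
def Claim_equal_get_project_type_py : Prop := ∀ (project_context : List (String × List (List (String × String)))), Dom_get_project_type_py project_context → Spec_get_project_type_py project_context (get_project_type_py project_context)

-- ===== LEMMAS AND PROOFS =====

-- the loop computes m OR'd with the presence bits of the two any() scans
theorem pvGPTloop_eq (l : List (List (String × String))) (m : Nat) (hm : m ≤ 3) :
    pvGPTloop l m =
      m ||| (if l.any (fun f => (PySem.Dict.mk f).get? "type" == some "Frontend") then 1 else 0)
        ||| (if l.any (fun f => (PySem.Dict.mk f).get? "type" == some "Backend") then 2 else 0) := by
  induction l generalizing m with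
  | nil => simp [pvGPTloop]
  | cons f rest ih =>
    simp only [pvGPTloop, List.any_cons]
    by_cases hF : ((PySem.Dict.mk f).get? "type" == some "Frontend") = true
    · have hB : ((PySem.Dict.mk f).get? "type" == some "Backend") = false := by
        cases hq : (PySem.Dict.mk f).get? "type" <;> simp_all
      have h1 : m ||| 1 ≤ 3 := by interval_cases m <;> decide
      simp only [hF, hB, Bool.false_or, Bool.true_or, Bool.false_eq_true, if_false, reduceIte]
      by_cases h3 : (m ||| 1 == 3) = true
      · have hm3 : m ||| 1 = 3 := by simpa using h3
        rw [if_pos h3, hm3]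
        cases rest.any (fun f => (PySem.Dict.mk f).get? "type" == some "Frontend") <;>
          cases rest.any (fun f => (PySem.Dict.mk f).get? "type" == some "Backend") <;>
          simp
      · rw [if_neg h3, ih _ h1]
        cases rest.any (fun f => (PySem.Dict.mk f).get? "type" == some "Frontend") <;>
          cases rest.any (fun f => (PySem.Dict.mk f).get? "type" == some "Backend") <;>
          simp
    · by_cases hB : ((PySem.Dict.mk f).get? "type" == some "Backend") = true
      · have h2 : m ||| 2 ≤ 3 := by interval_cases m <;> decide
        simp only [hF, hB, Bool.false_or, Bool.true_or, Bool.false_eq_true, if_false, reduceIte]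
        by_cases h3 : (m ||| 2 == 3) = true
        · have hm3 : m ||| 2 = 3 := by simpa using h3
          rw [if_pos h3, hm3]
          cases rest.any (fun f => (PySem.Dict.mk f).get? "type" == some "Frontend") <;>
            simp <;> interval_cases m <;> revert hm3 <;> decide
        · rw [if_neg h3, ih _ h2]
          cases rest.any (fun f => (PySem.Dict.mk f).get? "type" == some "Frontend") <;>
            cases rest.any (fun f => (PySem.Dict.mk f).get? "type" == some "Backend") <;>
            simp <;> interval_cases m <;> decide
      · simp only [hF, hB, Bool.false_or, Bool.false_eq_true, if_false]
        by_cases h3 : (m == 3) = true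
        · have hm3 : m = 3 := by simpa using h3
          rw [if_pos h3, hm3]
          cases rest.any (fun f => (PySem.Dict.mk f).get? "type" == some "Frontend") <;>
            cases rest.any (fun f => (PySem.Dict.mk f).get? "type" == some "Backend") <;>
            simp
        · rw [if_neg h3, ih _ hm]

-- ===== VERDICT (by name: the statement is the Claim_ definition above) =====
theorem get_project_type_py_spec : Claim_equal_get_project_type_py := by
  intro pc _
  unfold Spec_get_project_type_py get_project_type_py get_project_type_py_alt
  set fws := PySem.Dict.getD (PySem.Dict.mk pc) "frameworks" [] with hf
  rw [pvGPTloop_eq fws 0 (by decide)]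
  by_cases h : fws = []
  · simp [h, pvGPTnames, PySem.List.pyGet?, PySem.List.pyIdx?]
  · simp only [if_neg h]
    cases fws.any (fun f => (PySem.Dict.mk f).get? "type" == some "Frontend") <;>
      cases fws.any (fun f => (PySem.Dict.mk f).get? "type" == some "Backend") <;>
      simp [pvGPTnames, PySem.List.pyGet?, PySem.List.pyIdx?]
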